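-- pv_equiv track=rewrite | github.com/artkpv/code-dojo | _other/heads_and_tails/pr.py | headstails
-- ===== SOURCE A (Python) =====
-- def headstails(s):
--     if not s:
--         return 0
--     n = len(s)
--     heads = [0] * (n+1)
--     heads[0] = 1 if s[0] == 'H' else 0
--     for i in range(1, n):
--         heads[i] = heads[i-1] + (1 if s[i] == 'H' else 0)
--     heads[-1] = heads[-2] # Extra is T.
--     res = heads[-1]
--     for i in range(1, n+1):
--         res = min(res, i - heads[i-1] + heads[-1] - heads[i-1])
--     return res
-- ===== SOURCE B (Python) =====
-- def headstails(s):
--     # One-pass DP: dp_h = flips so only heads seen so far; dp_t = flips once tails begun.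
--     dp_h = 0
--     dp_t = 0
--     for c in s:
--         dp_h, dp_t = dp_h + (0 if c == 'H' else 1), min(dp_h, dp_t) + (1 if c == 'H' else 0)
--     return min(dp_h, dp_t)
-- ===== Notes on version B (the rewrite author's own statement) =====
-- stated objective: faster
-- what changed: Replaced the O(n) prefix-sum array plus a second min-over-splits pass with a single left-to-right O(1)-space DP holding two running costs (prefix-all-heads, tails-begun).
import Mathlib
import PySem

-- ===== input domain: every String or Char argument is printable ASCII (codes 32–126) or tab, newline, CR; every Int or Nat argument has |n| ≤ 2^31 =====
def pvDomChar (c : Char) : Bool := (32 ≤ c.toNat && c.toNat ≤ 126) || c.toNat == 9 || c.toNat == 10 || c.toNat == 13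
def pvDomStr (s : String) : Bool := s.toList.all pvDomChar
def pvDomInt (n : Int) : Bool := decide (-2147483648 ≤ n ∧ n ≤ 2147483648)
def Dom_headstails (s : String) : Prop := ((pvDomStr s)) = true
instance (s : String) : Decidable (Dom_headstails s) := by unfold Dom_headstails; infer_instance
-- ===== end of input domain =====

-- B replaces A's prefix-sum array and second min-over-splits pass with a single
-- left-to-right two-counter DP (O(1) extra space instead of O(n)).

-- ===== PORT A =====
def headstails (s : String) : Int :=
  let l := s.toList
  if l = [] then 0
  else
    let n : Nat := l.length
    let heads : List Int := List.replicate (n + 1) 0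
    let heads := PySem.List.pySetD heads 0
      (if PySem.List.pyGetD l 0 ' ' = 'H' then 1 else 0)
    let heads := (PySem.List.pyRange 1 (n : Int) 1).foldl
      (fun h i => PySem.List.pySetD h i
        (PySem.List.pyGetD h (i - 1) 0 +
          (if PySem.List.pyGetD l i ' ' = 'H' then 1 else 0))) heads
    let heads := PySem.List.pySetD heads (-1) (PySem.List.pyGetD heads (-2) 0)
    let res := PySem.List.pyGetD heads (-1) 0
    (PySem.List.pyRange 1 ((n : Int) + 1) 1).foldl
      (fun res i => min res (i - PySem.List.pyGetD heads (i - 1) 0 +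
        PySem.List.pyGetD heads (-1) 0 - PySem.List.pyGetD heads (i - 1) 0)) res

-- ===== PORT B =====
def headstails_alt (s : String) : Int :=
  let p := s.toList.foldl
    (fun (st : Int × Int) c =>
      (st.1 + (if c = 'H' then 0 else 1),
       min st.1 st.2 + (if c = 'H' then 1 else 0)))
    (0, 0)
  min p.1 p.2

-- ===== PRECONDITION & SPEC =====
def Spec_headstails (s : String) (out : Int) : Prop := out = headstails_alt s
instance (s : String) (out : Int) : Decidable (Spec_headstails s out) := by unfold Spec_headstails; infer_instance

-- ===== CLAIM (what is proved, stated in full; the proofs are below) =====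
def Claim_equal_headstails : Prop := ∀ (s : String), Dom_headstails s → Spec_headstails s (headstails s)

-- ===== LEMMAS AND PROOFS =====

-- number of 'H' in a list
def pvCH (l : List Char) : Int := (l.countP (fun c => c = 'H') : Int)

-- cost of the split after the first i characters: flips in the head part + flips in the tail part
def pvG (l : List Char) (i : Nat) : Int :=
  (i : Int) - pvCH (l.take i) + pvCH l - pvCH (l.take i)

-- recursive characterisation of the minimum split cost
def pvBest : List Char → Int
  | [] => 0
  | c :: l => min (pvCH (c :: l)) ((if c = 'H' then 0 else 1) + pvBest l)

-- state of A's heads array after the first k loop steps (1 ≤ k ≤ length)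
def pvH (l : List Char) (k : Nat) : List Int :=
  (List.range (l.length + 1)).map (fun i => if i < k then pvCH (l.take (i + 1)) else 0)

theorem pvCH_nil : pvCH [] = 0 := by simp [pvCH]

theorem pvCH_cons (c : Char) (l : List Char) :
    pvCH (c :: l) = (if c = 'H' then 1 else 0) + pvCH l := by
  simp only [pvCH, List.countP_cons]
  split_ifs <;> simp_all
  omega

theorem pvCH_take_succ (l : List Char) (k : Nat) (hk : k < l.length) :
    pvCH (l.take (k + 1)) = pvCH (l.take k) + (if l.getD k ' ' = 'H' then 1 else 0) := by
  rw [List.getD_eq_getElem l ' ' hk, List.take_add_one, List.getElem?_eq_getElem hk]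
  simp only [pvCH, List.countP_append, Option.toList_some, List.countP_cons, List.countP_nil]
  split_ifs <;> simp_all

theorem pvG_zero (l : List Char) : pvG l 0 = pvCH l := by
  simp [pvG, pvCH_nil]

theorem pvG_cons (c : Char) (l : List Char) (k : Nat) :
    pvG (c :: l) (k + 1) = pvG l k + (if c = 'H' then 0 else 1) := by
  simp only [pvG, List.take_succ_cons, pvCH_cons]
  push_cast
  split_ifs <;> ring

theorem pvBest_le_pvCH (l : List Char) : pvBest l ≤ pvCH l := by
  cases l with
  | nil => simp [pvBest, pvCH_nil]
  | cons c l => simp [pvBest]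

-- B's fold computes pvBest
theorem alt_fold (l : List Char) : ∀ h t : Int,
    (let p := l.foldl
      (fun (st : Int × Int) c =>
        (st.1 + (if c = 'H' then 0 else 1),
         min st.1 st.2 + (if c = 'H' then 1 else 0))) (h, t)
     min p.1 p.2) = min (t + pvCH l) (h + pvBest l) := by
  induction l with
  | nil => intro h t; simp [pvCH_nil, pvBest, min_comm]
  | cons c l ih =>
    intro h t
    simp only [List.foldl_cons]
    rw [ih]
    show _ = min (t + pvCH (c :: l)) (h + pvBest (c :: l))
    rw [pvBest, pvCH_cons]
    split_ifs <;> omega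

theorem headstails_alt_eq (s : String) : headstails_alt s = pvBest s.toList := by
  rw [headstails_alt]
  rw [alt_fold s.toList 0 0]
  have := pvBest_le_pvCH s.toList
  omega

-- pulling a common '+ a' shift out of a fold of mins
theorem foldl_min_shift {α : Type} (xs : List α) (f : α → Int) (a i0 : Int) :
    ∀ j0 : Int, xs.foldl (fun r x => min r (f x + a)) (min i0 (j0 + a)) =
      min i0 (xs.foldl (fun r x => min r (f x)) j0 + a) := by
  induction xs with
  | nil => intro j0; simp
  | cons x xs ih =>
    intro j0
    simp only [List.foldl_cons]
    have h : min (min i0 (j0 + a)) (f x + a) = min i0 (min j0 (f x) + a) := by omega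
    rw [h, ih]

-- the min over all splits, taken in A's fold order, equals pvBest
theorem fold_pvG_eq_pvBest (l : List Char) :
    (List.range l.length).foldl (fun r k => min r (pvG l (k + 1))) (pvG l 0) = pvBest l := by
  induction l with
  | nil => simp [pvG_zero, pvCH_nil, pvBest]
  | cons c l ih =>
    have hlen : (c :: l).length = l.length + 1 := rfl
    rw [hlen, List.range_succ_eq_map, List.foldl_cons, List.foldl_map]
    have hterm : (fun (r : Int) (k : Nat) => min r (pvG (c :: l) (k + 1 + 1))) =
        (fun (r : Int) (k : Nat) => min r (pvG l (k + 1) + (if c = 'H' then 0 else 1))) := by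
      funext r k; rw [pvG_cons]
    rw [hterm]
    have hinit : min (pvG (c :: l) 0) (pvG (c :: l) (0 + 1)) =
        min (pvCH (c :: l)) (pvG l 0 + (if c = 'H' then 0 else 1)) := by
      rw [pvG_zero, pvG_cons, pvG_zero]
    rw [hinit, foldl_min_shift (List.range l.length) (fun k => pvG l (k + 1))
      (if c = 'H' then 0 else 1) (pvCH (c :: l)), ih]
    rw [pvBest]
    omega

-- total pySetD at index -1 writes the last slot
theorem pvSetD_neg_one {α : Type} (xs : List α) (h : 0 < xs.length) (v : α) :
    PySem.List.pySetD xs (-1) v = xs.set (xs.length - 1) v := by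
  rw [PySem.List.pySetD, PySem.List.pySet?, PySem.List.pyIdx?]
  rw [if_neg (by omega), if_pos (by omega)]
  simp

-- reading the array pvH builds
theorem pvH_getD (l : List Char) (k i : Nat) (hi : i < l.length + 1) :
    (pvH l k).getD i 0 = if i < k then pvCH (l.take (i + 1)) else 0 := by
  simp [pvH, List.getD_eq_getElem?_getD, hi]

-- initial heads array (after heads[0] is set) is pvH l 1
theorem heads_init (c : Char) (l : List Char) :
    PySem.List.pySetD (List.replicate ((c :: l).length + 1) 0) 0
      (if PySem.List.pyGetD (c :: l) 0 ' ' = 'H' then 1 else 0) = pvH (c :: l) 1 := by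
  rw [PySem.List.pySetD_of_nonneg _ _ (by norm_num)]
  apply List.ext_getElem
  · simp [pvH]
  · intro i h1 h2
    simp only [pvH, List.getElem_map, List.getElem_range]
    rcases i with _ | i
    · simp [PySem.List.pyGetD_zero_cons, pvCH_cons, pvCH_nil]
    · simp [List.getElem_replicate]

-- one loop step sends pvH l k to pvH l (k+1)
theorem heads_step (l : List Char) (k : Nat) (hk1 : 1 ≤ k) (hkn : k < l.length) :
    PySem.List.pySetD (pvH l k) (k : Int)
      (PySem.List.pyGetD (pvH l k) ((k : Int) - 1) 0 +
        (if PySem.List.pyGetD l (k : Int) ' ' = 'H' then 1 else 0)) = pvH l (k + 1) := by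
  have hcast : ((k : Int) - 1) = ((k - 1 : Nat) : Int) := by omega
  rw [hcast, PySem.List.pyGetD_natCast, PySem.List.pyGetD_natCast, PySem.List.pySetD_natCast]
  rw [pvH_getD l k (k - 1) (by omega), if_pos (by omega)]
  have hk1' : k - 1 + 1 = k := by omega
  rw [hk1']
  apply List.ext_getElem
  · simp [pvH]
  · intro i h1 h2
    simp only [pvH, List.length_map, List.length_range] at h2
    simp only [pvH, List.getElem_set, List.getElem_map, List.getElem_range]
    by_cases hik : k = i
    · subst hik
      rw [if_pos rfl, if_pos (Nat.lt_succ_self k), pvCH_take_succ l k hkn]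
    · rw [if_neg hik]
      by_cases hlt : i < k
      · rw [if_pos hlt, if_pos (by omega)]
      · rw [if_neg hlt, if_neg (by omega)]

-- the whole loop: folding over range(1, n) turns pvH l 1 into pvH l n
theorem heads_loop (l : List Char) (m : Nat) (hm : 1 + m <= l.length) :
    (PySem.List.pyRange 1 ((1 + m : Nat) : Int) 1).foldl
      (fun h i => PySem.List.pySetD h i
        (PySem.List.pyGetD h (i - 1) 0 +
          (if PySem.List.pyGetD l i ' ' = 'H' then 1 else 0))) (pvH l 1) = pvH l (1 + m) := by
  induction m with
  | zero => rw [PySem.List.pyRange_one_eq_nil (by norm_num)]; rfl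
  | succ m ih =>
    have h1 : ((1 + (m + 1) : Nat) : Int) = ((1 + m : Nat) : Int) + 1 := by push_cast; ring
    rw [h1, PySem.List.pyRange_one_succ_right (by push_cast; omega), List.foldl_append,
      ih (by omega)]
    simp only [List.foldl_cons, List.foldl_nil]
    rw [heads_step l (1 + m) (by omega) (by omega), Nat.add_assoc]

-- the final heads array: heads[i] = pvCH (take (i+1) l) for every i
theorem heads_final (l : List Char) (hne : l ≠ []) :
    PySem.List.pySetD (pvH l l.length) (-1) (PySem.List.pyGetD (pvH l l.length) (-2) 0) =
      (List.range (l.length + 1)).map (fun i => pvCH (l.take (i + 1))) := by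
  have hlen : (pvH l l.length).length = l.length + 1 := by simp [pvH]
  have hn1 : 1 ≤ l.length := List.length_pos_of_ne_nil hne
  have hget2 : PySem.List.pyGetD (pvH l l.length) (-2) 0 = pvCH l := by
    rw [PySem.List.pyGetD_neg_ofNat (pvH l l.length) 2 0 (by omega) (by omega)]
    simp only [hlen]
    simp only [pvH, List.getElem_map, List.getElem_range]
    rw [if_pos (by omega)]
    have h2 : l.length + 1 - 2 + 1 = l.length := by omega
    rw [h2, List.take_length]
  rw [hget2, pvSetD_neg_one _ (by omega), hlen]
  apply List.ext_getElem
  · simp [pvH]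
  · intro i h1 h2
    simp only [List.length_map, List.length_range] at h2
    simp only [pvH, List.getElem_set, List.getElem_map, List.getElem_range]
    by_cases hik : l.length + 1 - 1 = i
    · rw [if_pos hik]
      rw [List.take_of_length_le (by omega)]
    · rw [if_neg hik, if_pos (by omega)]

-- reading the final heads array
theorem hfin_getD (l : List Char) (k : Nat) (hk : k < l.length + 1) :
    ((List.range (l.length + 1)).map (fun i => pvCH (l.take (i + 1)))).getD k 0 =
      pvCH (l.take (k + 1)) := by
  simp [List.getD_eq_getElem?_getD, hk]

theorem hfin_last (l : List Char) :
    PySem.List.pyGetD ((List.range (l.length + 1)).map (fun i => pvCH (l.take (i + 1)))) (-1) 0 =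
      pvCH l := by
  rw [PySem.List.pyGetD_neg_ofNat _ 1 0 (by omega) (by simp)]
  simp only [List.length_map, List.length_range]
  have h : l.length + 1 - 1 = l.length := by omega
  simp only [h, List.getElem_map, List.getElem_range]
  rw [List.take_of_length_le (by omega)]

theorem headstails_eq (s : String) : headstails s = pvBest s.toList := by
  cases hl : s.toList with
  | nil => simp [headstails, hl, pvBest]
  | cons c t =>
    have hne : (c :: t) ≠ ([] : List Char) := by simp
    simp only [headstails, hl, if_neg hne]
    rw [heads_init c t]
    have hcast : (((c :: t).length : Nat) : Int) = ((1 + t.length : Nat) : Int) := by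
      simp [Nat.add_comm]
    rw [hcast, heads_loop (c :: t) t.length (by simp [Nat.add_comm])]
    have hlen' : (1 + t.length) = (c :: t).length := by simp [Nat.add_comm]
    rw [hlen', heads_final (c :: t) hne]
    set l := c :: t with hldef
    set Hfin := (List.range (l.length + 1)).map (fun i => pvCH (l.take (i + 1))) with hf
    rw [hfin_last l]
    rw [PySem.List.pyRange_one 1 ((l.length : Int) + 1)]
    have htn : (((l.length : Int) + 1) - 1).toNat = l.length := by omega
    rw [htn, List.foldl_map]
    have hbody : ∀ (r : Int) (k : Nat), k ∈ List.range l.length →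
        min r (1 + (k : Int) - PySem.List.pyGetD Hfin (1 + (k : Int) - 1) 0 +
          pvCH l - PySem.List.pyGetD Hfin (1 + (k : Int) - 1) 0) =
        min r (pvG l (k + 1)) := by
      intro r k hk
      rw [List.mem_range] at hk
      have hc : (1 + (k : Int) - 1) = ((k : Nat) : Int) := by omega
      rw [hc, PySem.List.pyGetD_natCast, hf, hfin_getD l k (by omega)]
      have hg : pvG l (k + 1) = 1 + (k : Int) - pvCH (l.take (k + 1)) + pvCH l - pvCH (l.take (k + 1)) := by
        simp only [pvG]
        push_cast
        ring
      rw [hg]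
    rw [PySem.List.foldl_congr_mem _ _ (fun (r : Int) (k : Nat) => min r (pvG l (k + 1))) _ hbody]
    rw [← pvG_zero l]
    rw [fold_pvG_eq_pvBest l]

-- ===== VERDICT (by name: the statement is the Claim_ definition above) =====
theorem headstails_spec : Claim_equal_headstails := by
  intro s _
  unfold Spec_headstails
  rw [headstails_eq, headstails_alt_eq]
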